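-- pv_equiv track=rewrite | github.com/VRAXION/VRAXION | tools/diag_phase_d0_5_jackpot_aperture.py | group_by_step
-- ===== SOURCE A (Python) =====
-- from collections import defaultdict
--
-- def group_by_step(rows: list[dict]) -> list[list[dict]]:
--     """Group rows by (run_id, step). Returns list of step-groups, each containing
--     K candidates in order."""
--     grouped = defaultdict(list)
--     for r in rows:
--         try:
--             step = int(r["step"])
--         except (KeyError, ValueError):
--             continue
--         grouped[step].append(r)
--     return [grouped[k] for k in sorted(grouped.keys())]
-- ===== SOURCE B (Python) =====
-- def group_by_step(rows):
--     """Group rows by int(r["step"]); groups in ascending step order, rows in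
--     original order inside each group (sort-then-scan instead of dict buckets)."""
--     pairs = []
--     for r in rows:
--         try:
--             pairs.append((int(r["step"]), r))
--         except (KeyError, ValueError):
--             pass
--     pairs.sort(key=lambda p: p[0])  # stable: equal steps keep input order
--     out = []
--     i = 0
--     n = len(pairs)
--     while i < n:
--         j = i + 1
--         while j < n and pairs[j][0] == pairs[i][0]:
--             j += 1
--         out.append([r for _, r in pairs[i:j]])
--         i = j
--     return out
-- ===== Notes on version B (the rewrite author's own statement) =====
-- stated objective: alternative
-- what changed: Replaces the defaultdict bucketing pass plus key sort with building a filtered (step, row) pair list, stably sorting it by step, and one consecutive-run scan that emits the groups.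
import Mathlib
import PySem

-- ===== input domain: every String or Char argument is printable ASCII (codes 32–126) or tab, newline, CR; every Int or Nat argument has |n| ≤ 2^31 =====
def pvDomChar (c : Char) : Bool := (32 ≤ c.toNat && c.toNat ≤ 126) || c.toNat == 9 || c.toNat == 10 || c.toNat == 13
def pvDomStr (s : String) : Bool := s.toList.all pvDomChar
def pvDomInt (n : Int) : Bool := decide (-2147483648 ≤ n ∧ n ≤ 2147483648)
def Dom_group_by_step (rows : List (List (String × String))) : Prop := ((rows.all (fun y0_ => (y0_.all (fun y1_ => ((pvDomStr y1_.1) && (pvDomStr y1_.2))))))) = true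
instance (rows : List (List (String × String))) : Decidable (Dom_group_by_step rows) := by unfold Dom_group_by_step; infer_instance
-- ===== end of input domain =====

-- B replaces A's defaultdict-bucket-then-sorted-keys strategy by filter, stable sort by step,
-- then one consecutive-run scan (alternative decomposition; same asymptotic cost).

-- int(r["step"]) with try/except KeyError/ValueError: none where Python would raise
def pvStepOf? (r : List (String × String)) : Option Int :=
  ((PySem.Dict.mk r).get? "step").bind PySem.Int.ofStr?

-- ===== PORT A =====
def group_by_step (rows : List (List (String × String))) : List (List (List (String × String))) :=
  let grouped : PySem.Dict Int (List (List (String × String))) :=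
    rows.foldl (fun d r =>
      match pvStepOf? r with
      | none => d                       -- except (KeyError, ValueError): continue
      | some step => d.modify step [] (fun g => g ++ [r]))  -- grouped[step].append(r)
      PySem.Dict.empty
  (PySem.List.sorted grouped.keys (fun k => k) false).map (fun k => grouped.getD k [])

-- ===== PORT B =====
-- the consecutive-run scan of Source B's while loops: peel the leading run of equal steps
def pvPeelRuns : List (Int × List (String × String)) → List (List (List (String × String)))
  | [] => []
  | (k, r) :: rest =>
      (r :: (rest.takeWhile (fun p => p.1 == k)).map Prod.snd)
        :: pvPeelRuns (rest.dropWhile (fun p => p.1 == k))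
termination_by s => s.length
decreasing_by
  simp only [List.length_cons]
  exact Nat.lt_succ_of_le (List.length_dropWhile_le _ _)

def group_by_step_alt (rows : List (List (String × String))) : List (List (List (String × String))) :=
  let pairs : List (Int × List (String × String)) :=
    rows.foldl (fun acc r =>
      match pvStepOf? r with
      | none => acc
      | some s => acc ++ [(s, r)]) []
  pvPeelRuns (PySem.List.sorted pairs (fun p => p.1) false)

-- ===== PRECONDITION & SPEC =====
def Spec_group_by_step (rows : List (List (String × String))) (out : List (List (List (String × String)))) : Prop := out = group_by_step_alt rows
instance (rows : List (List (String × String))) (out : List (List (List (String × String)))) : Decidable (Spec_group_by_step rows out) := by unfold Spec_group_by_step; infer_instance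

-- ===== CLAIM (what is proved, stated in full; the proofs are below) =====
def Claim_equal_group_by_step : Prop := ∀ (rows : List (List (String × String))), Dom_group_by_step rows → Spec_group_by_step rows (group_by_step rows)

-- ===== LEMMAS AND PROOFS =====

-- the filtered (step, row) pairs both programs work on
def pvPairs (rows : List (List (String × String))) : List (Int × List (String × String)) :=
  rows.filterMap (fun r => (pvStepOf? r).map (fun s => (s, r)))

-- A's bucket loop over rows is the canonical modify-append fold over the filtered pairs
theorem pvFoldA_eq (rows : List (List (String × String)))
    (d : PySem.Dict Int (List (List (String × String)))) :
    rows.foldl (fun d r =>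
      match pvStepOf? r with
      | none => d
      | some step => d.modify step [] (fun g => g ++ [r])) d
    = (pvPairs rows).foldl (fun d p => d.modify p.1 [] (fun g => g ++ [p.2])) d := by
  induction rows generalizing d with
  | nil => rfl
  | cons r rows ih =>
      simp only [pvPairs, List.filterMap_cons, List.foldl_cons]
      cases h : pvStepOf? r with
      | none => simpa [pvPairs, h] using ih d
      | some s => simpa [pvPairs, h] using ih (d.modify s [] (fun g => g ++ [r]))

-- B's append loop over rows builds exactly the filtered pairs
theorem pvFoldB_eq (rows : List (List (String × String)))
    (acc : List (Int × List (String × String))) :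
    rows.foldl (fun acc r =>
      match pvStepOf? r with
      | none => acc
      | some s => acc ++ [(s, r)]) acc
    = acc ++ pvPairs rows := by
  induction rows generalizing acc with
  | nil => simp [pvPairs]
  | cons r rows ih =>
      simp only [pvPairs, List.filterMap_cons, List.foldl_cons]
      cases h : pvStepOf? r with
      | none => simpa [pvPairs, h] using ih acc
      | some s => simp [pvPairs, ih (acc ++ [(s, r)])]

-- STABILITY: inserting into a key-sorted list never passes an equal key,
-- so filtering one key out of the stable sort gives the original filter.
theorem pvPairwise_insertBy {β : Type} (x : Int × β) (acc : List (Int × β))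
    (h : acc.Pairwise (fun a b => a.1 ≤ b.1)) :
    (PySem.List.insertBy (fun a b => decide (a.1 < b.1)) x acc).Pairwise
      (fun a b => a.1 ≤ b.1) := by
  induction acc with
  | nil => simp [PySem.List.insertBy]
  | cons y ys ih =>
      rcases List.pairwise_cons.mp h with ⟨hy, hys⟩
      by_cases hlt : x.1 < y.1
      · simp only [PySem.List.insertBy, hlt, decide_true, if_true]
        refine List.pairwise_cons.mpr ⟨?_, h⟩
        intro z hz
        rcases List.mem_cons.mp hz with rfl | hz
        · exact le_of_lt hlt
        · exact le_trans (le_of_lt hlt) (hy z hz)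
      · simp only [PySem.List.insertBy, hlt, decide_false]
        refine List.pairwise_cons.mpr ⟨?_, ih hys⟩
        intro z hz
        rcases (PySem.List.mem_insertBy _ x z ys).mp hz with rfl | hz
        · exact le_of_not_gt hlt
        · exact hy z hz

theorem pvFilter_insertBy {β : Type} (x : Int × β) (acc : List (Int × β)) (k : Int)
    (h : acc.Pairwise (fun a b => a.1 ≤ b.1)) :
    (PySem.List.insertBy (fun a b => decide (a.1 < b.1)) x acc).filter (fun p => p.1 == k)
    = acc.filter (fun p => p.1 == k) ++ (if x.1 == k then [x] else []) := by
  induction acc with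
  | nil => simp [PySem.List.insertBy]; split <;> simp_all
  | cons y ys ih =>
      rcases List.pairwise_cons.mp h with ⟨hy, hys⟩
      by_cases hlt : x.1 < y.1
      · simp only [PySem.List.insertBy, hlt, decide_true, if_true]
        by_cases hxk : x.1 = k
        · -- every element of y :: ys has key > k, so the old filter is empty
          have hnil : (y :: ys).filter (fun p => p.1 == k) = [] := by
            apply List.filter_eq_nil_iff.mpr
            intro p hp
            have : k < p.1 := by
              rcases List.mem_cons.mp hp with rfl | hp
              · omega
              · have := hy p hp; omega
            simp; omega
          simp [hnil, hxk]
        · have : (x.1 == k) = false := by simp [hxk]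
          simp [List.filter_cons, this]
      · simp only [PySem.List.insertBy, hlt, decide_false]
        simp [List.filter_cons, ih hys]
        split <;> simp
theorem pvFilter_foldl {β : Type} (l : List (Int × β)) (acc : List (Int × β)) (k : Int)
    (h : acc.Pairwise (fun a b => a.1 ≤ b.1)) :
    (l.foldl (fun a x => PySem.List.insertBy (fun a b => decide (a.1 < b.1)) x a) acc).filter
        (fun p => p.1 == k)
    = acc.filter (fun p => p.1 == k) ++ l.filter (fun p => p.1 == k) := by
  induction l generalizing acc with
  | nil => simp
  | cons x l ih =>
      simp only [List.foldl_cons]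
      rw [ih _ (pvPairwise_insertBy x acc h), pvFilter_insertBy x acc k h]
      simp [List.filter_cons]
      split <;> simp

theorem pvSorted_filter {β : Type} (l : List (Int × β)) (k : Int) :
    (PySem.List.sorted l (fun p => p.1) false).filter (fun p => p.1 == k)
    = l.filter (fun p => p.1 == k) := by
  rw [PySem.List.sorted_eq_foldl_insertBy l (fun p => p.1)]
  simpa using pvFilter_foldl l [] k (by simp)

-- helper: the head of a dropWhile fails the predicate
theorem pvDropWhile_head {α : Type} (p : α → Bool) (l : List α) (q : α) (t : List α)
    (h : l.dropWhile p = q :: t) : p q = false := by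
  induction l with
  | nil => simp at h
  | cons x l ih =>
      by_cases hx : p x
      · rw [List.dropWhile_cons_of_pos hx] at h; exact ih h
      · rw [List.dropWhile_cons_of_neg hx] at h
        cases h; simpa using hx

-- GROUPING: mapping the per-key filter over ANY strictly increasing list of
-- exactly the occurring keys equals the consecutive-run scan of a sorted list.
theorem pvPeel_eq (s : List (Int × List (String × String))) (ks : List Int)
    (hs : s.Pairwise (fun a b => a.1 ≤ b.1))
    (hks : ks.Pairwise (· < ·))
    (hmem : ∀ k, k ∈ ks ↔ ∃ p ∈ s, p.1 = k) :
    ks.map (fun k => (s.filter (fun p => p.1 == k)).map Prod.snd) = pvPeelRuns s := by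
  induction s using pvPeelRuns.induct generalizing ks with
  | case1 =>
      have : ks = [] := by
        apply List.eq_nil_iff_forall_not_mem.mpr
        intro k hk
        rcases (hmem k).mp hk with ⟨p, hp, _⟩
        simp at hp
      simp [this, pvPeelRuns]
  | case2 k r rest ih =>
      have hrest : rest.Pairwise (fun a b => a.1 ≤ b.1) := (List.pairwise_cons.mp hs).2
      have hhead : ∀ p ∈ rest, k ≤ p.1 := by
        intro p hp; exact (List.pairwise_cons.mp hs).1 p hp
      set run := rest.takeWhile (fun p => p.1 == k) with hrun
      set rest' := rest.dropWhile (fun p => p.1 == k) with hrest'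
      have hsplit : rest = run ++ rest' := (List.takeWhile_append_dropWhile).symm
      have hrunk : ∀ p ∈ run, p.1 = k := by
        intro p hp
        have := List.mem_takeWhile_imp hp
        simpa using this
      have hrest'_mem : ∀ p ∈ rest', p ∈ rest := by
        intro p hp; exact (List.dropWhile_sublist _).mem hp
      have hgt : ∀ p ∈ rest', k < p.1 := by
        cases hq : rest' with
        | nil => simp
        | cons q t =>
            intro p hp
            have hqf : (q.1 == k) = false := pvDropWhile_head _ rest q t (hrest' ▸ hq)
            have hqk : k < q.1 := by
              have h1 : k ≤ q.1 := hhead q (hrest'_mem q (by simp [hq]))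
              have h2 : q.1 ≠ k := by simpa using hqf
              omega
            rcases List.mem_cons.mp hp with rfl | hp'
            · exact hqk
            · have hrp : rest'.Pairwise (fun a b => a.1 ≤ b.1) :=
                hrest.sublist (List.dropWhile_sublist _)
              have := (List.pairwise_cons.mp (hq ▸ hrp)).1 p hp'
              omega
      have hfilter_s : ((k, r) :: rest).filter (fun p => p.1 == k) = (k, r) :: run := by
        rw [hsplit, List.filter_cons]
        simp only [beq_self_eq_true, if_true, List.filter_append]
        rw [List.filter_eq_self.mpr (fun p hp => by simp [hrunk p hp]),
            List.filter_eq_nil_iff.mpr (fun p hp => by have := hgt p hp; simp; omega)]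
        simp
      -- ks starts with k
      have hkmem : k ∈ ks := (hmem k).mpr ⟨(k, r), by simp⟩
      obtain ⟨k0, ks', rfl⟩ : ∃ k0 ks', ks = k0 :: ks' := by
        cases ks with
        | nil => simp at hkmem
        | cons a b => exact ⟨a, b, rfl⟩
      have hk0 : k0 = k := by
        rcases (hmem k0).mp (by simp) with ⟨p, hp, hpk⟩
        have hk0k : k ≤ k0 := by
          rcases List.mem_cons.mp hp with rfl | hp'
          · omega
          · have := hhead p hp'; omega
        rcases List.mem_cons.mp hkmem with rfl | hk'
        · rfl
        · have := (List.pairwise_cons.mp hks).1 k hk'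
          omega
      subst hk0
      have hks' : ks'.Pairwise (· < ·) := (List.pairwise_cons.mp hks).2
      have hk0lt : ∀ k' ∈ ks', k0 < k' := (List.pairwise_cons.mp hks).1
      have hmem' : ∀ k', k' ∈ ks' ↔ ∃ p ∈ rest', p.1 = k' := by
        intro k'
        constructor
        · intro hk'
          have hklt := hk0lt k' hk'
          rcases (hmem k').mp (by simp [hk']) with ⟨p, hp, hpk⟩
          rcases List.mem_cons.mp hp with rfl | hp'
          · omega
          · rw [hsplit] at hp'
            rcases List.mem_append.mp hp' with hp'' | hp''
            · have := hrunk p hp''; omega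
            · exact ⟨p, hp'', hpk⟩
        · rintro ⟨p, hp, rfl⟩
          have hpm : p.1 ∈ k0 :: ks' :=
            (hmem p.1).mpr ⟨p, by rw [hsplit]; exact List.mem_cons_of_mem _ (List.mem_append_right _ hp), rfl⟩
          have := hgt p hp
          rcases List.mem_cons.mp hpm with h | h
          · omega
          · exact h
      have hfilter' : ∀ k' ∈ ks',
          (((k0, r) :: rest).filter (fun p => p.1 == k')).map Prod.snd
          = (rest'.filter (fun p => p.1 == k')).map Prod.snd := by
        intro k' hk'
        have hklt := hk0lt k' hk'
        rw [hsplit, List.filter_cons]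
        have h1 : ((k0 : Int) == k') = false := by simp; omega
        rw [if_neg (by simp [h1]), List.filter_append,
            List.filter_eq_nil_iff.mpr (fun p hp => by have := hrunk p hp; simp; omega)]
        simp
      have hrp' : rest'.Pairwise (fun a b => a.1 ≤ b.1) :=
        hrest.sublist (List.dropWhile_sublist _)
      rw [List.map_cons, hfilter_s, List.map_cons]
      rw [List.map_congr_left hfilter']
      rw [ih _ hrp' hks' hmem']
      rw [pvPeelRuns]

-- main assembly
theorem pvMain (rows : List (List (String × String))) :
    group_by_step rows = group_by_step_alt rows := by
  unfold group_by_step group_by_step_alt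
  rw [pvFoldA_eq, pvFoldB_eq]
  simp only [List.nil_append]
  set pairs := pvPairs rows with hpairs
  -- A's per-key lists are the per-key filters of pairs
  have hgetD : ∀ k : Int,
      ((pairs.foldl (fun d p => d.modify p.1 [] (fun g => g ++ [p.2]))
          (PySem.Dict.empty : PySem.Dict Int (List (List (String × String))))).getD k [])
      = (pairs.filter (fun p => p.1 == k)).map Prod.snd := by
    intro k
    rw [PySem.Dict.getD_foldl_modify_append]
    rfl
  have hkeys : (pairs.foldl (fun d p => d.modify p.1 [] (fun g => g ++ [p.2]))
        (PySem.Dict.empty : PySem.Dict Int (List (List (String × String))))).keys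
      = PySem.Set.ofList (pairs.map Prod.fst) := by
    have := PySem.Dict.keys_foldl_modify_key pairs (fun p => p.1) []
      (fun _ p g => g ++ [p.2]) (PySem.Dict.empty (κ := Int) (ν := List (List (String × String))))
    simpa using this
  rw [List.map_congr_left (fun k _ => hgetD k), hkeys]
  -- B's side via the grouping lemma, with A's sorted key list
  set s := PySem.List.sorted pairs (fun p => p.1) false with hsdef
  have hfilt : ∀ k : Int, pairs.filter (fun p => p.1 == k) = s.filter (fun p => p.1 == k) :=
    fun k => (pvSorted_filter pairs k).symm
  rw [List.map_congr_left (fun k _ => by rw [hfilt k])]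
  apply pvPeel_eq
  · exact PySem.List.sorted_pairwise pairs (fun p => p.1)
  · exact PySem.List.sorted_ofList_pairwise_lt (pairs.map Prod.fst)
  · intro k
    rw [PySem.List.mem_sorted, PySem.Set.mem_ofList]
    simp only [hsdef, PySem.List.mem_sorted, List.mem_map]

-- ===== VERDICT (by name: the statement is the Claim_ definition above) =====
theorem group_by_step_spec : Claim_equal_group_by_step := by
  intro rows _
  unfold Spec_group_by_step
  exact pvMain rows
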